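-- pv_equiv track=rewrite | github.com/tiegebentley/autonomous-cms-builder | backend/agents/builder.py | _detect_content_types_from_patterns
-- ===== SOURCE A (Python) =====
-- from typing import Dict, Any, List
--
-- def _detect_content_types_from_patterns(patterns: Dict) -> Dict[str, List[str]]:
--     """Detect content types from URL patterns and content structure"""
--     content_types = {
--         "pages": [],
--         "locations": [],
--         "programs": [],
--         "services": [],
--         "blog": [],
--         "team": []
--     }
--
--     for filename, data in patterns.items():
--         if not isinstance(data, dict):
--             continue
--
--         title = (data.get("title") or "").lower()
--         path = (data.get("path") or filename).lower()
--         headings = data.get("headings", {})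
--
--         # Location detection
--         if any(keyword in path or keyword in title for keyword in ["location", "downtown", "north-", "cary", "apex", "wake-forest", "address"]):
--             content_types["locations"].append(filename)
--         # Programs/Training detection
--         elif any(keyword in path or keyword in title for keyword in ["program", "training", "clinic", "group-training", "team-training"]):
--             content_types["programs"].append(filename)
--         # Services detection
--         elif any(keyword in path or keyword in title for keyword in ["service", "offering", "what-we-do"]):
--             content_types["services"].append(filename)
--         # Blog detection
--         elif any(keyword in path or keyword in title for keyword in ["blog", "post", "article", "news"]):
--             content_types["blog"].append(filename)
--         # Team detection
--         elif any(keyword in path or keyword in title for keyword in ["team", "staff", "coach", "about-us"]):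
--             content_types["team"].append(filename)
--         # Default to pages
--         else:
--             content_types["pages"].append(filename)
--
--     # Remove empty content types
--     return {k: v for k, v in content_types.items() if v}
-- ===== SOURCE B (Python) =====
-- from typing import Dict, Any, List
--
-- RULES = [
--     ("locations", ["location", "downtown", "north-", "cary", "apex", "wake-forest", "address"]),
--     ("programs", ["program", "training", "clinic", "group-training", "team-training"]),
--     ("services", ["service", "offering", "what-we-do"]),
--     ("blog", ["blog", "post", "article", "news"]),
--     ("team", ["team", "staff", "coach", "about-us"]),
-- ]
-- CATEGORIES = ["pages", "locations", "programs", "services", "blog", "team"]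
--
-- def _classify(filename: str, data: Dict) -> str:
--     title = (data.get("title") or "").lower()
--     path = (data.get("path") or filename).lower()
--     for cat, keywords in RULES:
--         if any(k in path or k in title for k in keywords):
--             return cat
--     return "pages"
--
-- def _detect_content_types_from_patterns(patterns: Dict) -> Dict[str, List[str]]:
--     items = [(fn, d) for fn, d in patterns.items() if isinstance(d, dict)]
--     result = {}
--     for cat in CATEGORIES:
--         names = [fn for fn, d in items if _classify(fn, d) == cat]
--         if names:
--             result[cat] = names
--     return result
-- ===== Notes on version B (the rewrite author's own statement) =====
-- stated objective: simpler
-- what changed: Replaces the six-way elif cascade appending into a pre-built mutable dict of buckets (followed by an empty-removal pass) with a data-driven design: an ordered rule table, a classify helper, and one filter per category that builds the result dict directly, so no empty buckets are ever created or removed.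
import Mathlib
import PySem

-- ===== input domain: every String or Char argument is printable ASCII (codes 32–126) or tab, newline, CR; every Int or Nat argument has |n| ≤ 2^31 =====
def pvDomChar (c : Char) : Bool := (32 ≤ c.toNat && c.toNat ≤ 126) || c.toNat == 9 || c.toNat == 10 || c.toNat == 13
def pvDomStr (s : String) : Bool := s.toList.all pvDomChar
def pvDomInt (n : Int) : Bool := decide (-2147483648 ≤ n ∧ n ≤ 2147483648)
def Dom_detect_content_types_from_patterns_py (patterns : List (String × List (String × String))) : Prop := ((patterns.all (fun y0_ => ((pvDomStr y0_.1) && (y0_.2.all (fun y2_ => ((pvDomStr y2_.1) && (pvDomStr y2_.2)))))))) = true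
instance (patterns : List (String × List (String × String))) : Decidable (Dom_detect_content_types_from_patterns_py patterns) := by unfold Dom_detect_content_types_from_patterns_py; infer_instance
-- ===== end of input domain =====

-- B replaces A's six-way elif cascade + mutable dict + empty-removal pass by a rule table, a
-- classify helper, and one per-category filter building the result directly (objective: simpler).

-- shared: Python's `any(keyword in path or keyword in title for keyword in kws)`
def pvAnyKw (kws : List String) (path title : String) : Bool :=
  kws.any (fun k => PySem.Str.isIn k path || PySem.Str.isIn k title)

-- ===== PORT A =====
-- loop body of A's `for filename, data in patterns.items()` (data is a dict by type, so the
-- isinstance-continue never fires)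
def pvBodyA (d : PySem.Dict String (List String)) (fp : String × List (String × String)) :
    PySem.Dict String (List String) :=
  let filename := fp.1
  let data : PySem.Dict String String := PySem.Dict.mk fp.2
  let title := PySem.Str.lower ((data.get? "title").getD "")
  let p0 := (data.get? "path").getD ""
  let path := PySem.Str.lower (if p0 = "" then filename else p0)
  if pvAnyKw ["location", "downtown", "north-", "cary", "apex", "wake-forest", "address"] path title then
    d.modify "locations" [] (· ++ [filename])
  else if pvAnyKw ["program", "training", "clinic", "group-training", "team-training"] path title then
    d.modify "programs" [] (· ++ [filename])
  else if pvAnyKw ["service", "offering", "what-we-do"] path title then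
    d.modify "services" [] (· ++ [filename])
  else if pvAnyKw ["blog", "post", "article", "news"] path title then
    d.modify "blog" [] (· ++ [filename])
  else if pvAnyKw ["team", "staff", "coach", "about-us"] path title then
    d.modify "team" [] (· ++ [filename])
  else
    d.modify "pages" [] (· ++ [filename])

def detect_content_types_from_patterns_py (patterns : List (String × List (String × String))) :
    List (String × List String) :=
  let init : PySem.Dict String (List String) :=
    PySem.Dict.ofList [("pages", []), ("locations", []), ("programs", []), ("services", []), ("blog", []), ("team", [])]
  let ct := patterns.foldl pvBodyA init
  -- {k: v for k, v in content_types.items() if v}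
  ct.items.filter (fun kv => !kv.2.isEmpty)

-- ===== PORT B =====
def pvRules : List (String × List String) :=
  [("locations", ["location", "downtown", "north-", "cary", "apex", "wake-forest", "address"]),
   ("programs", ["program", "training", "clinic", "group-training", "team-training"]),
   ("services", ["service", "offering", "what-we-do"]),
   ("blog", ["blog", "post", "article", "news"]),
   ("team", ["team", "staff", "coach", "about-us"])]

def pvCategories : List String := ["pages", "locations", "programs", "services", "blog", "team"]

-- B's `for cat, keywords in RULES: … return cat` loop
def pvFirstRule (path title : String) : List (String × List String) → Option String
  | [] => none
  | r :: rs => if pvAnyKw r.2 path title then some r.1 else pvFirstRule path title rs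

def pvClassify (filename : String) (data : List (String × String)) : String :=
  let d : PySem.Dict String String := PySem.Dict.mk data
  let title := PySem.Str.lower ((d.get? "title").getD "")
  let p0 := (d.get? "path").getD ""
  let path := PySem.Str.lower (if p0 = "" then filename else p0)
  (pvFirstRule path title pvRules).getD "pages"

def detect_content_types_from_patterns_py_alt (patterns : List (String × List (String × String))) :
    List (String × List String) :=
  pvCategories.foldl (fun acc cat =>
    let names := (patterns.filter (fun fp => pvClassify fp.1 fp.2 == cat)).map (·.1)
    if names.isEmpty then acc else acc ++ [(cat, names)]) []

-- ===== PRECONDITION & SPEC =====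
def Spec_detect_content_types_from_patterns_py (patterns : List (String × List (String × String))) (out : List (String × List String)) : Prop := out = detect_content_types_from_patterns_py_alt patterns
instance (patterns : List (String × List (String × String))) (out : List (String × List String)) : Decidable (Spec_detect_content_types_from_patterns_py patterns out) := by unfold Spec_detect_content_types_from_patterns_py; infer_instance

-- ===== CLAIM (what is proved, stated in full; the proofs are below) =====
def Claim_equal_detect_content_types_from_patterns_py : Prop := ∀ (patterns : List (String × List (String × String))), Dom_detect_content_types_from_patterns_py patterns → Spec_detect_content_types_from_patterns_py patterns (detect_content_types_from_patterns_py patterns)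

-- ===== LEMMAS AND PROOFS =====

-- proof-only abbreviations for A's initial dict and the per-category filter result
def pvInit : PySem.Dict String (List String) :=
  PySem.Dict.ofList [("pages", []), ("locations", []), ("programs", []), ("services", []), ("blog", []), ("team", [])]

def pvF (patterns : List (String × List (String × String))) (c : String) : List String :=
  (patterns.filter (fun fp => pvClassify fp.1 fp.2 == c)).map (·.1)

-- A's elif cascade appends the filename to exactly the category pvClassify picks
set_option maxHeartbeats 1000000 in
theorem pvBodyA_eq (d : PySem.Dict String (List String)) (fp : String × List (String × String)) :
    pvBodyA d fp = d.modify (pvClassify fp.1 fp.2) [] (· ++ [fp.1]) := by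
  unfold pvBodyA pvClassify pvRules
  simp only [pvFirstRule]
  split_ifs <;> rfl

theorem pvBodyA_funext :
    pvBodyA = fun d (fp : String × List (String × String)) =>
      d.modify (pvClassify fp.1 fp.2) [] (· ++ [fp.1]) :=
  funext fun d => funext fun fp => pvBodyA_eq d fp

theorem pvClassify_mem (fn : String) (data : List (String × String)) :
    pvClassify fn data ∈ pvCategories := by
  unfold pvClassify pvRules pvCategories
  simp only [pvFirstRule]
  split_ifs <;> simp

theorem pvSet_update_self (xs s : List String) (h : ∀ x ∈ xs, x ∈ s) :
    PySem.Set.update s xs = s := by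
  induction xs generalizing s with
  | nil => rfl
  | cons x xs ih =>
    have hc : PySem.Set.contains s x = true := (PySem.Set.contains_iff s x).2 (h x (by simp))
    have hadd : PySem.Set.add s x = s := by unfold PySem.Set.add; rw [hc]; simp
    have hstep : PySem.Set.update s (x :: xs) = PySem.Set.update (PySem.Set.add s x) xs := rfl
    rw [hstep, hadd]
    exact ih s (fun y hy => h y (by simp [hy]))

theorem pvFilterMap {α β : Type} (f : α → β) (p : β → Bool) (l : List α) :
    (l.map f).filter p = (l.filter (fun a => p (f a))).map f := by
  induction l with
  | nil => rfl
  | cons a l ih => by_cases h : p (f a) <;> simp [h, ih]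

theorem pvFoldlIfAppend (cats : List String) (F : String → List String)
    (acc : List (String × List String)) :
    cats.foldl (fun acc c => if (F c).isEmpty then acc else acc ++ [(c, F c)]) acc
      = acc ++ (cats.map (fun c => (c, F c))).filter (fun kv => !kv.2.isEmpty) := by
  induction cats generalizing acc with
  | nil => simp
  | cons c cs ih =>
    simp only [List.isEmpty_iff] at ih ⊢
    by_cases hl : F c = []
    · rw [List.foldl_cons, if_pos hl, ih, List.map_cons, List.filter_cons]
      simp [hl]
    · rw [List.foldl_cons, if_neg hl, ih, List.map_cons, List.filter_cons]
      simp [hl]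

theorem pvCt_fold (patterns : List (String × List (String × String))) :
    patterns.foldl pvBodyA pvInit
      = (patterns.map (fun fp => (pvClassify fp.1 fp.2, fp.1))).foldl
          (fun d p => d.modify p.1 [] (· ++ [p.2])) pvInit := by
  rw [pvBodyA_funext, List.foldl_map]

theorem pvCt_keys (patterns : List (String × List (String × String))) :
    (patterns.foldl pvBodyA pvInit).keys = pvCategories := by
  rw [pvCt_fold, PySem.Dict.keys_foldl_modify_key]
  have hik : pvInit.keys = pvCategories := by decide
  rw [hik]
  apply pvSet_update_self
  intro x hx
  simp only [List.map_map, List.mem_map, Function.comp] at hx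
  obtain ⟨fp, _, hfp⟩ := hx
  simpa [← hfp] using pvClassify_mem fp.1 fp.2

theorem pvCt_getD (patterns : List (String × List (String × String))) (c : String)
    (hc : c ∈ pvCategories) :
    (patterns.foldl pvBodyA pvInit).getD c [] = pvF patterns c := by
  rw [pvCt_fold, PySem.Dict.getD_foldl_modify_append]
  have hik : pvInit.getD c [] = [] := by fin_cases hc <;> rfl
  rw [hik, pvFilterMap, List.map_map]
  simp [pvF]

theorem pvCt_items (patterns : List (String × List (String × String))) :
    (patterns.foldl pvBodyA pvInit).items
      = pvCategories.map (fun c => (c, pvF patterns c)) := by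
  have hnodup : (patterns.foldl pvBodyA pvInit).keys.Nodup := by
    rw [pvCt_keys]; decide
  rw [PySem.Dict.items_eq_map_keys _ hnodup [], pvCt_keys]
  exact List.map_congr_left (fun c hc => by rw [pvCt_getD patterns c hc])

-- ===== VERDICT (by name: the statement is the Claim_ definition above) =====
theorem detect_content_types_from_patterns_py_spec : Claim_equal_detect_content_types_from_patterns_py := by
  intro patterns _
  unfold Spec_detect_content_types_from_patterns_py
  show (patterns.foldl pvBodyA pvInit).items.filter (fun kv => !kv.2.isEmpty)
      = pvCategories.foldl (fun acc cat =>
          if (pvF patterns cat).isEmpty then acc else acc ++ [(cat, pvF patterns cat)]) []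
  rw [pvCt_items]
  have h := pvFoldlIfAppend pvCategories (pvF patterns) []
  simp only [List.nil_append] at h
  exact h.symm
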